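-- pv_equiv track=rewrite | github.com/Morfinic/PWR-VI-KZW | Lab5/main.py | liczCmax
-- ===== SOURCE A (Python) =====
-- def liczCmax(procList):
--     t: int = 0
--     Cmax: int = 0
--
--     for proc in procList:
--         t = max(t, proc[0])
--         t += proc[1]
--         Cmax = max(Cmax, t + proc[2])
--
--     return Cmax
-- ===== SOURCE B (Python) =====
-- def liczCmax(procList):
--     # Reformulation: unroll the recurrence t_i = max(t_{i-1}, r_i) + d_i into
--     # t_i = S[i] + M[i], where S = prefix sums of durations and
--     # M[i] = max(0, max_{j<i} (r_j - S[j])) is a prefix max of adjusted release times.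
--     n = len(procList)
--     S = [0] * (n + 1)
--     for i, p in enumerate(procList):
--         S[i + 1] = S[i] + p[1]
--     M = [0] * (n + 1)
--     for i, p in enumerate(procList):
--         M[i + 1] = max(M[i], p[0] - S[i])
--     best = 0
--     for i, p in enumerate(procList):
--         best = max(best, S[i + 1] + M[i + 1] + p[2])
--     return best
-- ===== Notes on version B (the rewrite author's own statement) =====
-- stated objective: alternative
-- what changed: A's fused loop maintaining the recurrence t = max(t, release) + duration is replaced by a prefix-sum reformulation: B materializes the prefix sums S of durations and a prefix maximum M of adjusted release times r_j - S[j], recovers each finish time as S[i+1] + M[i+1], and takes the max completion in a third pass.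
import Mathlib
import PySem

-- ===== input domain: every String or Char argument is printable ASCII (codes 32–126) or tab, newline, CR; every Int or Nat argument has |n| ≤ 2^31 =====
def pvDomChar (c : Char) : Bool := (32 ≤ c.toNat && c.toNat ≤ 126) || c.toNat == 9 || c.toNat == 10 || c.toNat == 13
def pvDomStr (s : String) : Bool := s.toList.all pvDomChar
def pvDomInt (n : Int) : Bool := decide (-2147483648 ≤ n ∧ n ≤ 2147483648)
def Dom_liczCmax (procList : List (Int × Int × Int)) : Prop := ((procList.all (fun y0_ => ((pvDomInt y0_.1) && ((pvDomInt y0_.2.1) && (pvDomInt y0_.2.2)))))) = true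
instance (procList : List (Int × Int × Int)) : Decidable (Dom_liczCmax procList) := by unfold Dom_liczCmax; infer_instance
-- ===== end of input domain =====

-- B replaces A's fused recurrence loop (t = max(t, r) + d with a running Cmax) by a
-- prefix-sum reformulation: finish time = S[i+1] + M[i+1] with S prefix sums of durations
-- and M a prefix max of adjusted release times; alternative decomposition, same cost.

-- ===== PORT A =====
def liczCmax (procList : List (Int × Int × Int)) : Int :=
  (procList.foldl
    (fun (s : Int × Int) proc =>
      let t := max s.1 proc.1 + proc.2.1
      (t, max s.2 (t + proc.2.2)))
    (0, 0)).2

-- ===== PORT B =====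
-- pass 1 (tail of S): running prefix sums of durations, S[i+1] = S[i] + d_i
def pvScanS : List (Int × Int × Int) → Int → List Int
  | [], _ => []
  | p :: rest, s => (s + p.2.1) :: pvScanS rest (s + p.2.1)

-- pass 2 (tail of M): prefix max of adjusted release times, M[i+1] = max(M[i], r_i - S[i])
def pvScanM : List (Int × Int × Int) → List Int → Int → List Int
  | p :: rest, s :: srest, m => max m (p.1 - s) :: pvScanM rest srest (max m (p.1 - s))
  | _, _, _ => []

-- pass 3: best completion, completion_i = S[i+1] + M[i+1] + q_i
def liczCmax_alt (procList : List (Int × Int × Int)) : Int :=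
  let sTail := pvScanS procList 0
  let mTail := pvScanM procList (0 :: sTail) 0
  ((sTail.zip mTail).zip procList).foldl (fun b x => max b (x.1.1 + x.1.2 + x.2.2.2)) 0

-- ===== PRECONDITION & SPEC =====
def Spec_liczCmax (procList : List (Int × Int × Int)) (out : Int) : Prop := out = liczCmax_alt procList
instance (procList : List (Int × Int × Int)) (out : Int) : Decidable (Spec_liczCmax procList out) := by unfold Spec_liczCmax; infer_instance

-- ===== CLAIM (what is proved, stated in full; the proofs are below) =====
def Claim_equal_liczCmax : Prop := ∀ (procList : List (Int × Int × Int)), Dom_liczCmax procList → Spec_liczCmax procList (liczCmax procList)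

-- ===== LEMMAS AND PROOFS =====

-- shift a max by a constant
theorem max_add_shift (s m r : Int) : max (s + m) r = s + max m (r - s) := by
  rcases le_total (s + m) r with h | h
  · rw [max_eq_right h, max_eq_right (by omega)]; omega
  · rw [max_eq_left h, max_eq_left (by omega)]

-- loop invariant: A's running t equals s + m (prefix sum plus prefix max)
theorem liczCmax_loop_eq (l : List (Int × Int × Int)) : ∀ (s m C : Int),
    (l.foldl
      (fun (st : Int × Int) proc =>
        let t := max st.1 proc.1 + proc.2.1
        (t, max st.2 (t + proc.2.2)))
      (s + m, C)).2
    = (((pvScanS l s).zip (pvScanM l (s :: pvScanS l s) m)).zip l).foldl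
        (fun b x => max b (x.1.1 + x.1.2 + x.2.2.2)) C := by
  induction l with
  | nil => intro s m C; rfl
  | cons p rest ih =>
    intro s m C
    simp only [List.foldl, pvScanS, pvScanM, List.zip_cons_cons]
    rw [max_add_shift s m p.1]
    have h1 : s + max m (p.1 - s) + p.2.1 = (s + p.2.1) + max m (p.1 - s) := by omega
    rw [h1]
    exact ih (s + p.2.1) (max m (p.1 - s)) _

-- ===== VERDICT (by name: the statement is the Claim_ definition above) =====
theorem liczCmax_spec : Claim_equal_liczCmax := by
  intro procList _
  unfold Spec_liczCmax liczCmax liczCmax_alt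
  have := liczCmax_loop_eq procList 0 0 0
  simpa using this
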